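-- pv_equiv track=rewrite | github.com/GaurPeeyush/Pulse-Module-Extraction-AI | utils/crawler.py | prioritize_urls
-- ===== SOURCE A (Python) =====
-- def prioritize_urls(url_list):
--     """
--     Prioritize URLs that are likely to be documentation pages
--     Documentation pages often contain patterns like /article/, /doc/, /help/, etc.
--     """
--     documentation_patterns = [
--         'article', 'doc', 'help', 'guide', 'faq', 'tutorial', 'support',
--         'manual', 'reference', 'category', 'section', 'topic', 'content'
--     ]
--
--     def get_url_priority(url):
--         # Give higher priority to URLs with documentation-related patterns
--         url_lower = url.lower()
--         if any(pattern in url_lower for pattern in documentation_patterns):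
--             return 0  # Highest priority
--
--         # Paths with fewer segments are likely higher-level pages
--         path_depth = url.count('/')
--         return path_depth
--
--     # Sort URLs by priority (lower number = higher priority)
--     return sorted(url_list, key=get_url_priority)
-- ===== SOURCE B (Python) =====
-- def prioritize_urls(url_list):
--     """Bucket sort: group URLs by priority in a dict, then concatenate buckets in key order."""
--     documentation_patterns = [
--         'article', 'doc', 'help', 'guide', 'faq', 'tutorial', 'support',
--         'manual', 'reference', 'category', 'section', 'topic', 'content'
--     ]
--
--     def priority(url):
--         low = url.lower()
--         if any(p in low for p in documentation_patterns):
--             return 0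
--         return url.count('/')
--
--     buckets = {}
--     for url in url_list:
--         buckets.setdefault(priority(url), []).append(url)
--
--     result = []
--     for pr in sorted(buckets):
--         result.extend(buckets[pr])
--     return result
-- ===== Notes on version B (the rewrite author's own statement) =====
-- stated objective: alternative
-- what changed: Replaces the comparison sort keyed by priority with a bucket sort: one pass groups URLs into insertion-ordered dict buckets keyed by their priority, then the buckets are concatenated in sorted key order, preserving the stable within-bucket order.
import Mathlib
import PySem

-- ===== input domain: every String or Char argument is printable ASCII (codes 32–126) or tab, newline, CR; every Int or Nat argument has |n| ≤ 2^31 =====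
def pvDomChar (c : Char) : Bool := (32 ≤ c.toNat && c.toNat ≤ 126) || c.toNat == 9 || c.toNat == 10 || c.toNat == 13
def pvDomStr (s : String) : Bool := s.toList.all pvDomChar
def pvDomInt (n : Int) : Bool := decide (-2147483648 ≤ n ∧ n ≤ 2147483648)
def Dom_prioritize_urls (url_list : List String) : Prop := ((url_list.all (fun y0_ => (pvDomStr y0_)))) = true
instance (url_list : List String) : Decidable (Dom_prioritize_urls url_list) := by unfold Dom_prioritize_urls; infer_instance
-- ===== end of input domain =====

-- B replaces the comparison sort by a dict-based bucket sort (group by priority, concatenate buckets in sorted key order); objective: alternative.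

-- ===== PORT A =====
def pvDocumentationPatterns : List String :=
  ["article", "doc", "help", "guide", "faq", "tutorial", "support",
   "manual", "reference", "category", "section", "topic", "content"]

def get_url_priority (url : String) : Int :=
  let url_lower := PySem.Str.lower url
  if pvDocumentationPatterns.any (fun pattern => PySem.Str.isIn pattern url_lower) then 0
  else ((PySem.Str.count url "/" : Nat) : Int)

def prioritize_urls (url_list : List String) : List String :=
  PySem.List.sorted url_list get_url_priority

-- ===== PORT B =====
-- Source B's helper `priority` (same arithmetic as A's key, different surrounding algorithm)
def pvPriorityB (url : String) : Int :=
  let low := PySem.Str.lower url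
  if pvDocumentationPatterns.any (fun p => PySem.Str.isIn p low) then 0
  else ((PySem.Str.count url "/" : Nat) : Int)

def prioritize_urls_alt (url_list : List String) : List String :=
  let buckets : PySem.Dict Int (List String) :=
    url_list.foldl (fun d url => d.modify (pvPriorityB url) [] (fun cur => cur ++ [url]))
      PySem.Dict.empty
  (PySem.List.sorted buckets.keys (fun k => k)).foldl
    (fun result pr => result ++ buckets.getD pr []) []

-- ===== PRECONDITION & SPEC =====
def Spec_prioritize_urls (url_list : List String) (out : List String) : Prop := out = prioritize_urls_alt url_list
instance (url_list : List String) (out : List String) : Decidable (Spec_prioritize_urls url_list out) := by unfold Spec_prioritize_urls; infer_instance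

-- ===== CLAIM (what is proved, stated in full; the proofs are below) =====
def Claim_equal_prioritize_urls : Prop := ∀ (url_list : List String), Dom_prioritize_urls url_list → Spec_prioritize_urls url_list (prioritize_urls url_list)

-- ===== LEMMAS AND PROOFS =====

-- Insert a key into a strictly increasing list of keys (proof-only helper).
def pvInsKey (k : Int) : List Int → List Int
  | [] => [k]
  | y :: t => if k < y then k :: y :: t else if k = y then y :: t else y :: pvInsKey k t

-- The strictly increasing list of the distinct keys of xs.
def pvKeysOf {α : Type} (key : α → Int) (xs : List α) : List Int :=
  xs.foldl (fun acc x => pvInsKey (key x) acc) []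

theorem mem_pvInsKey (k m : Int) (l : List Int) : m ∈ pvInsKey k l ↔ m = k ∨ m ∈ l := by
  induction l with
  | nil => simp [pvInsKey]
  | cons y t ih =>
    simp only [pvInsKey]
    split_ifs with h1 h2
    · simp
    · subst h2; simp only [List.mem_cons]; tauto
    · simp [ih]; tauto

theorem pairwise_pvInsKey (k : Int) (l : List Int) (h : l.Pairwise (· < ·)) :
    (pvInsKey k l).Pairwise (· < ·) := by
  induction l with
  | nil => simp [pvInsKey]
  | cons y t ih =>
    rcases List.pairwise_cons.mp h with ⟨hy, ht⟩
    simp only [pvInsKey]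
    split_ifs with h1 h2
    · exact List.pairwise_cons.mpr ⟨by
        intro a ha; rcases List.mem_cons.mp ha with rfl | ha
        · exact h1
        · exact h1.trans (hy a ha), h⟩
    · exact h
    · have hyk : y < k := by omega
      refine List.pairwise_cons.mpr ⟨?_, ih ht⟩
      intro a ha
      rcases (mem_pvInsKey k a t).mp ha with rfl | ha
      · exact hyk
      · exact hy a ha

theorem mem_foldl_pvInsKey {α : Type} (key : α → Int) (m : Int) :
    ∀ (xs : List α) (acc : List Int),
      m ∈ xs.foldl (fun a x => pvInsKey (key x) a) acc ↔ m ∈ acc ∨ m ∈ xs.map key := by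
  intro xs
  induction xs with
  | nil => simp
  | cons x t ih =>
    intro acc
    simp only [List.foldl_cons, ih, mem_pvInsKey, List.map_cons, List.mem_cons]
    tauto

theorem mem_pvKeysOf {α : Type} (key : α → Int) (xs : List α) (m : Int) :
    m ∈ pvKeysOf key xs ↔ m ∈ xs.map key := by
  simp [pvKeysOf, mem_foldl_pvInsKey]

theorem pairwise_pvKeysOf {α : Type} (key : α → Int) (xs : List α) :
    (pvKeysOf key xs).Pairwise (· < ·) := by
  have h : ∀ (ys : List α) (acc : List Int), acc.Pairwise (· < ·) →
      (ys.foldl (fun a x => pvInsKey (key x) a) acc).Pairwise (· < ·) := by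
    intro ys
    induction ys with
    | nil => intro acc h; simpa using h
    | cons x t ih => intro acc hacc; exact ih _ (pairwise_pvInsKey _ _ hacc)
  exact h xs [] (by simp)

theorem insertBy_all_true {α : Type} (bef : α → α → Bool) (x : α) (l : List α)
    (h : ∀ z ∈ l, bef x z = true) : PySem.List.insertBy bef x l = x :: l := by
  cases l with
  | nil => simp [PySem.List.insertBy]
  | cons y t => simp [PySem.List.insertBy, h y (by simp)]

theorem insertBy_append_false {α : Type} (bef : α → α → Bool) (x : α) (l1 l2 : List α)
    (h : ∀ z ∈ l1, bef x z = false) :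
    PySem.List.insertBy bef x (l1 ++ l2) = l1 ++ PySem.List.insertBy bef x l2 := by
  induction l1 with
  | nil => simp
  | cons a t ih =>
    simp only [List.cons_append, PySem.List.insertBy, h a (by simp)]
    simp only [Bool.false_eq_true, if_false, List.cons.injEq, true_and]
    exact ih (fun z hz => h z (by simp [hz]))

theorem flatMap_no_x {α : Type} (key : α → Int) (x : α) (B : Int → List α) (ks : List Int)
    (h : ∀ k ∈ ks, key x ≠ k) :
    ks.flatMap (fun k => B k ++ if key x == k then [x] else []) = ks.flatMap B := by
  induction ks with
  | nil => rfl
  | cons y t ih =>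
    simp only [List.flatMap_cons]
    rw [if_neg (by simpa using h y (by simp)), List.append_nil,
      ih (fun k hk => h k (by simp [hk]))]

theorem insertBy_flatMap {α : Type} (key : α → Int) (x : α) (B : Int → List α) :
    ∀ ks : List Int, ks.Pairwise (· < ·) →
      (∀ k, ∀ z ∈ B k, key z = k) →
      (key x ∉ ks → B (key x) = []) →
      PySem.List.insertBy (fun a b => decide (key a < key b)) x (ks.flatMap B)
        = (pvInsKey (key x) ks).flatMap (fun k => B k ++ if key x == k then [x] else []) := by
  intro ks
  induction ks with
  | nil =>
    intro _ _ hkx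
    simp [PySem.List.insertBy, pvInsKey, hkx (by simp)]
  | cons y t ih =>
    intro hks hB hkx
    rcases List.pairwise_cons.mp hks with ⟨hy, ht⟩
    simp only [pvInsKey]
    by_cases h1 : key x < y
    · have hnot : key x ∉ y :: t := by
        intro hmem
        rcases List.mem_cons.mp hmem with rfl | hmem
        · omega
        · have := hy _ hmem; omega
      rw [if_pos h1]
      rw [insertBy_all_true _ _ _ (by
        intro z hz
        rcases List.mem_flatMap.mp hz with ⟨k, hk, hzk⟩
        have hzkey := hB k z hzk
        have : key x < k := by
          rcases List.mem_cons.mp hk with rfl | hk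
          · exact h1
          · exact h1.trans (hy _ hk)
        simp [hzkey]; omega)]
      simp only [List.flatMap_cons]
      rw [if_pos (by simp), hkx hnot]
      rw [flatMap_no_x key x B t (by intro k hk; have := hy _ hk; omega)]
      have hne : (key x == y) = false := by simp; omega
      simp [hne]
    · rw [if_neg h1]
      by_cases h2 : key x = y
      · rw [if_pos h2]
        simp only [List.flatMap_cons]
        rw [insertBy_append_false _ _ _ _ (by
          intro z hz
          have := hB y z hz
          simp [this]; omega)]
        rw [insertBy_all_true _ _ _ (by
          intro z hz
          rcases List.mem_flatMap.mp hz with ⟨k, hk, hzk⟩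
          have := hB k z hzk
          have := hy _ hk
          simp [hB k z hzk]; omega)]
        rw [if_pos (by simp [h2])]
        rw [flatMap_no_x key x B t (by intro k hk; have := hy _ hk; omega)]
        simp
      · have hy_lt : y < key x := by omega
        rw [if_neg h2]
        simp only [List.flatMap_cons]
        rw [insertBy_append_false _ _ _ _ (by
          intro z hz
          have := hB y z hz
          simp [this]; omega)]
        have hkx' : key x ∉ t → B (key x) = [] := by
          intro hnt
          apply hkx
          intro hc
          rcases List.mem_cons.mp hc with h | h
          · exact h2 h
          · exact hnt h
        rw [ih ht hB hkx']
        have hne : (key x == y) = false := by simp; omega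
        simp [hne]

theorem sorted_eq_flat {α : Type} (key : α → Int) (xs : List α) :
    PySem.List.sorted xs key
      = (pvKeysOf key xs).flatMap (fun k => xs.filter (fun z => key z == k)) := by
  induction xs using List.reverseRecOn with
  | nil => simp [pvKeysOf, PySem.List.sorted_eq_foldl_insertBy]
  | append_singleton xs x ih =>
    have hstep : PySem.List.sorted (xs ++ [x]) key
        = PySem.List.insertBy (fun a b => decide (key a < key b)) x (PySem.List.sorted xs key) := by
      rw [PySem.List.sorted_eq_foldl_insertBy, PySem.List.sorted_eq_foldl_insertBy,
        List.foldl_append]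
      rfl
    rw [hstep, ih]
    rw [insertBy_flatMap key x _ (pvKeysOf key xs) (pairwise_pvKeysOf key xs)
      (by intro k z hz; simpa using (List.mem_filter.mp hz).2)
      (by
        intro hnot
        rw [List.filter_eq_nil_iff]
        intro z hz hzk
        exact hnot ((mem_pvKeysOf key xs _).mpr (by
          simp only [List.mem_map]
          exact ⟨z, hz, by simpa using hzk⟩)))]
    have hkeys : pvKeysOf key (xs ++ [x]) = pvInsKey (key x) (pvKeysOf key xs) := by
      simp [pvKeysOf, List.foldl_append]
    rw [hkeys]
    apply List.flatMap_congr
    intro k _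
    rw [List.filter_append]
    congr 1
    by_cases h : key x = k
    · simp [List.filter, h]
    · have hf : (key x == k) = false := by simp [h]
      simp [List.filter, hf]

theorem pvKeysOf_eq_sorted_set {α : Type} [BEq α] (key : α → Int) (xs : List α) :
    PySem.List.sorted (PySem.Set.ofList (xs.map key)) (fun k => k) = pvKeysOf key xs := by
  apply PySem.List.sorted_eq_of_perm_of_pairwise_lt
  · apply (List.perm_ext_iff_of_nodup ?_ ?_).mpr
    · intro m
      rw [mem_pvKeysOf, PySem.Set.mem_ofList]
    · exact (pairwise_pvKeysOf key xs).imp (fun h => ne_of_lt h)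
    · exact PySem.Set.nodup_ofList _
  · exact pairwise_pvKeysOf key xs

-- ===== VERDICT (by name: the statement is the Claim_ definition above) =====
theorem prioritize_urls_spec : Claim_equal_prioritize_urls := by
  intro url_list _
  unfold Spec_prioritize_urls prioritize_urls prioritize_urls_alt
  have hfold :
      url_list.foldl (fun d url => d.modify (pvPriorityB url) [] (fun cur => cur ++ [url]))
        PySem.Dict.empty
      = (url_list.map (fun u => (pvPriorityB u, u))).foldl
          (fun d p => d.modify p.1 [] (fun cur => cur ++ [p.2])) PySem.Dict.empty := by
    rw [List.foldl_map]
  have hprio : pvPriorityB = get_url_priority := rfl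
  rw [hfold]
  rw [PySem.List.foldl_append_eq_flatMap]
  have hkeys :
      ((url_list.map (fun u => (pvPriorityB u, u))).foldl
        (fun d p => d.modify p.1 [] (fun cur => cur ++ [p.2])) PySem.Dict.empty).keys
      = PySem.Set.ofList (url_list.map pvPriorityB) := by
    rw [← hfold]
    rw [PySem.Dict.keys_foldl_modify_key url_list pvPriorityB []
      (fun _ url => fun cur => cur ++ [url]) PySem.Dict.empty]
    rw [PySem.Dict.keys_empty, PySem.Set.update_nil_left]
  rw [hkeys]
  have hgetD : ∀ k,
      ((url_list.map (fun u => (pvPriorityB u, u))).foldl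
        (fun d p => d.modify p.1 [] (fun cur => cur ++ [p.2])) PySem.Dict.empty).getD k []
      = url_list.filter (fun z => pvPriorityB z == k) := by
    intro k
    rw [PySem.Dict.getD_foldl_modify_append]
    rw [PySem.Dict.getD_empty]
    rw [List.filter_map, List.map_map]
    simp [Function.comp_def]
  rw [List.flatMap_congr (fun k _ => hgetD k)]
  rw [hprio, pvKeysOf_eq_sorted_set get_url_priority url_list]
  exact sorted_eq_flat get_url_priority url_list
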